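-- pv_equiv track=rewrite | github.com/nestorNeo/WFNAPP | src/core/petrinet.py | find_shared_sequences
-- ===== SOURCE A (Python) =====
-- def find_shared_sequences(precedence_relation):
--     """
--     Encuentra secuencias de eventos que son compartidas entre diferentes trazas.
--     Por ejemplo, si tenemos trazas:
--     x a b c d y
--     w e b c f z
--     Detectará que 'b c' es una secuencia compartida
--     """
--     shared_sequences = set()
--     sequence_entries = {} # Para almacenar las entradas a cada secuencia
--     sequence_exits = {}   # Para almacenar las salidas de cada secuencia
--
--     # Buscar secuencias de al menos 2 eventos que aparecen en el mismo orden
--     current_sequence = []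
--     for a, b in precedence_relation:
--         if a != 'start' and b != 'end':
--             # Buscar secuencias que empiezan con este par
--             sequence = []
--             sequence.append(a)
--             sequence.append(b)
--
--             # Buscar continuaciones de la secuencia
--             next_event = b
--             while True:
--                 next_relations = [(x, y) for x, y in precedence_relation if x == next_event and y != 'end']
--                 if len(next_relations) != 1:
--                     break
--                 next_event = next_relations[0][1]
--                 sequence.append(next_event)
--
--             if len(sequence) >= 2:
--                 sequence_tuple = tuple(sequence)
--                 shared_sequences.add(sequence_tuple)
--
--                 # Registrar entradas y salidas
--                 if sequence[0] not in sequence_entries: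
--                     sequence_entries[sequence[0]] = set()
--                 sequence_entries[sequence[0]].add(sequence_tuple)
--
--                 if sequence[-1] not in sequence_exits:
--                     sequence_exits[sequence[-1]] = set()
--                 sequence_exits[sequence[-1]].add(sequence_tuple)
--
--     return shared_sequences, sequence_entries, sequence_exits
-- ===== SOURCE B (Python) =====
-- def find_shared_sequences(precedence_relation):
--     # Pass 1: map each event to its unique non-'end' successor (None = zero or several).
--     uniq = {}
--     for x, y in precedence_relation:
--         if y != 'end':
--             uniq[x] = None if x in uniq else y
--
--     # Pass 2: extension table, one chase along uniq per DISTINCT chain head b.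
--     ext = {}
--     for a, b in precedence_relation:
--         if a != 'start' and b != 'end' and b not in ext:
--             tail = []
--             e = uniq.get(b)
--             while e is not None:
--                 tail.append(e)
--                 e = uniq.get(e)
--             ext[b] = tuple(tail)
--
--     # Pass 3: assemble the three results by pure O(1) lookups.
--     shared_sequences = set()
--     sequence_entries = {}
--     sequence_exits = {}
--     for a, b in precedence_relation:
--         if a != 'start' and b != 'end':
--             t = (a, b) + ext[b]
--             shared_sequences.add(t)
--             sequence_entries.setdefault(a, set()).add(t)
--             sequence_exits.setdefault(t[-1], set()).add(t)
--     return shared_sequences, sequence_entries, sequence_exits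
-- ===== Notes on version B (the rewrite author's own statement) =====
-- stated objective: faster
-- what changed: B restructures A's single interleaved pass (whose inner while rescans the whole relation at every chain step) into three staged passes: a unique-successor map, an extension table computed by one chase per DISTINCT chain head, and an assembly loop that only does O(1) dictionary lookups and never walks a chain.
import Mathlib
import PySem

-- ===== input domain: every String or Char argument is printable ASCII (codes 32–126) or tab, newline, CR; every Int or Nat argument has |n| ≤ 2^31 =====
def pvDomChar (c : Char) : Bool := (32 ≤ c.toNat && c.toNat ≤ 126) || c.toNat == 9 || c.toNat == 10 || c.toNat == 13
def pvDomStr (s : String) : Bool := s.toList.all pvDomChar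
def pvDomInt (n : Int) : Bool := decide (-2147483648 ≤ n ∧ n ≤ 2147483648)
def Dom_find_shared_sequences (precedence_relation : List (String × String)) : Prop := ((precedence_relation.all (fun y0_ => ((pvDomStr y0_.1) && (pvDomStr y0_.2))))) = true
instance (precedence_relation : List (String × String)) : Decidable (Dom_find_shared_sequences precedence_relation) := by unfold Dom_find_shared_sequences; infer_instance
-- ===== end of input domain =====

-- B replaces A's single pass with per-pair chain walks that rescan the whole relation at every step by
-- three staged passes (unique-successor map, extension table per distinct chain head, lookup-only assembly).

-- ===== PORT A =====
-- A's inner list comprehension: [(x, y) for x, y in precedence_relation if x == next_event and y != 'end']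
def pvNextRels (precedence_relation : List (String × String)) (next_event : String) : List (String × String) :=
  precedence_relation.filter (fun p => p.1 == next_event && p.2 != "end")

-- A's `while True:` loop, made total with fuel |rel|+1: whenever the Python loop terminates it breaks
-- within that many iterations (a longer unique-successor chain revisits a node and Python loops forever,
-- returning nothing), and when the fuel runs out exactly at the break the returned `sequence` is the same.
def chainA (precedence_relation : List (String × String)) : Nat → String → List String → List String
  | 0, _, seq => seq
  | n + 1, next_event, seq =>
    match pvNextRels precedence_relation next_event with
    | [p] => chainA precedence_relation n p.2 (seq ++ [p.2])   -- len == 1: follow next_relations[0][1]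
    | _ => seq                                                 -- len(next_relations) != 1: break

def stepA (precedence_relation : List (String × String))
    (st : PySem.Set (List String) × PySem.Dict String (PySem.Set (List String)) × PySem.Dict String (PySem.Set (List String)))
    (ab : String × String) :
    PySem.Set (List String) × PySem.Dict String (PySem.Set (List String)) × PySem.Dict String (PySem.Set (List String)) :=
  if ab.1 != "start" && ab.2 != "end" then
    let seq := chainA precedence_relation (precedence_relation.length + 1) ab.2 [ab.1, ab.2]
    if 2 ≤ seq.length then
      let sh := PySem.Set.add st.1 seq
      let k0 := PySem.List.pyGetD seq 0 ""      -- sequence[0] (always in range: seq starts [a, b])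
      let en := (if st.2.1.contains k0 then st.2.1 else st.2.1.insert k0 PySem.Set.empty).modify k0 PySem.Set.empty (fun s => PySem.Set.add s seq)
      let kl := PySem.List.pyGetD seq (-1) ""   -- sequence[-1] (always in range)
      let ex := (if st.2.2.contains kl then st.2.2 else st.2.2.insert kl PySem.Set.empty).modify kl PySem.Set.empty (fun s => PySem.Set.add s seq)
      (sh, en, ex)
    else st
  else st

def find_shared_sequences (precedence_relation : List (String × String)) : List (List String) × (List (String × List (List String))) × (List (String × List (List String))) :=
  let res := precedence_relation.foldl (stepA precedence_relation)
    ((PySem.Set.empty : PySem.Set (List String)),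
     (PySem.Dict.empty : PySem.Dict String (PySem.Set (List String))),
     (PySem.Dict.empty : PySem.Dict String (PySem.Set (List String))))
  (res.1, res.2.1.items, res.2.2.items)

-- ===== PORT B =====
-- Pass 1: uniq[x] = the unique non-'end' successor of x, None on a second hit
def buildUniq (precedence_relation : List (String × String)) : PySem.Dict String (Option String) :=
  precedence_relation.foldl
    (fun d p => if p.2 != "end" then d.insert p.1 (if d.contains p.1 then none else some p.2) else d)
    PySem.Dict.empty

-- B's `while e is not None:` chase along uniq; fuel |rel|+1 totalises it (same bound as A's port)
def chase (uniq : PySem.Dict String (Option String)) : Nat → Option String → List String → List String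
  | 0, _, tail => tail
  | _ + 1, none, tail => tail
  | n + 1, some e, tail => chase uniq n (uniq.getD e none) (tail ++ [e])

-- Pass 2: extension table, one chase per distinct eligible chain head b
def buildExt (uniq : PySem.Dict String (Option String)) (fuel : Nat)
    (precedence_relation : List (String × String)) : PySem.Dict String (List String) :=
  precedence_relation.foldl
    (fun d p => if p.1 != "start" && p.2 != "end" && !(d.contains p.2)
                then d.insert p.2 (chase uniq fuel (uniq.getD p.2 none) []) else d)
    PySem.Dict.empty

-- Pass 3: assembly step, pure lookups only
def stepB (ext : PySem.Dict String (List String))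
    (st : PySem.Set (List String) × PySem.Dict String (PySem.Set (List String)) × PySem.Dict String (PySem.Set (List String)))
    (ab : String × String) :
    PySem.Set (List String) × PySem.Dict String (PySem.Set (List String)) × PySem.Dict String (PySem.Set (List String)) :=
  if ab.1 != "start" && ab.2 != "end" then
    let t := ab.1 :: ab.2 :: ext.getD ab.2 []
    let kl := PySem.List.pyGetD t (-1) ""   -- t[-1]
    (PySem.Set.add st.1 t,
     st.2.1.modify ab.1 PySem.Set.empty (fun s => PySem.Set.add s t),   -- setdefault(a, set()).add(t)
     st.2.2.modify kl PySem.Set.empty (fun s => PySem.Set.add s t))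
  else st

def find_shared_sequences_alt (precedence_relation : List (String × String)) : List (List String) × (List (String × List (List String))) × (List (String × List (List String))) :=
  let uniq := buildUniq precedence_relation
  let ext := buildExt uniq (precedence_relation.length + 1) precedence_relation
  let res := precedence_relation.foldl (stepB ext)
    ((PySem.Set.empty : PySem.Set (List String)),
     (PySem.Dict.empty : PySem.Dict String (PySem.Set (List String))),
     (PySem.Dict.empty : PySem.Dict String (PySem.Set (List String))))
  (res.1, res.2.1.items, res.2.2.items)

-- ===== PRECONDITION & SPEC =====
-- no Pre_: both ports are total (the fuel |rel|+1 totalises the loops identically on both sides)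
def Spec_find_shared_sequences (precedence_relation : List (String × String)) (out : List (List String) × (List (String × List (List String))) × (List (String × List (List String)))) : Prop := out = find_shared_sequences_alt precedence_relation
instance (precedence_relation : List (String × String)) (out : List (List String) × (List (String × List (List String))) × (List (String × List (List String)))) : Decidable (Spec_find_shared_sequences precedence_relation out) := by unfold Spec_find_shared_sequences; infer_instance

-- ===== CLAIM (what is proved, stated in full; the proofs are below) =====
def Claim_equal_find_shared_sequences : Prop := ∀ (precedence_relation : List (String × String)), Dom_find_shared_sequences precedence_relation → Spec_find_shared_sequences precedence_relation (find_shared_sequences precedence_relation)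

-- ===== LEMMAS AND PROOFS =====

-- one fold step of pass 1, seen on a single lookup
def clsStep (o : Option (Option String)) (y : String) : Option (Option String) :=
  match o with
  | none => some (some y)
  | some _ => some none

-- pass 1's dictionary at key x is the fold of clsStep over the non-'end' successors of x
theorem buildUniq_get? (rel : List (String × String)) :
    ∀ (d : PySem.Dict String (Option String)) (x : String),
      (rel.foldl (fun d p => if p.2 != "end" then d.insert p.1 (if d.contains p.1 then none else some p.2) else d) d).get? x
        = ((pvNextRels rel x).map (fun p => p.2)).foldl clsStep (d.get? x) := by
  induction rel with
  | nil => intro d x; rfl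
  | cons p tl ih =>
    intro d x
    by_cases he : p.2 = "end"
    · have hfilt : pvNextRels (p :: tl) x = pvNextRels tl x := by
        simp [pvNextRels, he]
      rw [List.foldl_cons, hfilt, if_neg (by simp [he])]
      exact ih d x
    · by_cases hx : p.1 = x
      · subst hx
        have hfilt : pvNextRels (p :: tl) p.1 = p :: pvNextRels tl p.1 := by
          simp [pvNextRels, he]
        rw [List.foldl_cons, hfilt, List.map_cons, List.foldl_cons, if_pos (by simp [he]), ih]
        congr 1
        rw [PySem.Dict.get?_insert_self, PySem.Dict.contains_eq_isSome_get?]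
        cases d.get? p.1 <;> rfl
      · have hfilt : pvNextRels (p :: tl) x = pvNextRels tl x := by
          simp [pvNextRels, hx]
        rw [List.foldl_cons, hfilt, if_pos (by simp [he]), ih]
        congr 1
        exact PySem.Dict.get?_insert_of_ne d _ (fun h => hx h.symm)

theorem clsStep_foldl_some (ys : List String) :
    ∀ (o : Option String), ys.foldl clsStep (some o) = if ys.isEmpty then some o else some none := by
  induction ys with
  | nil => intro o; rfl
  | cons y ys ih =>
    intro o
    simp only [List.foldl_cons, List.isEmpty_cons, clsStep]
    rw [ih none]
    cases ys <;> simp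

-- characterisation: pass 1's lookup is exactly A's singleton test on the comprehension
theorem uniq_getD (rel : List (String × String)) (x : String) :
    (buildUniq rel).getD x none
      = (match pvNextRels rel x with | [p] => some p.2 | _ => none) := by
  have h := buildUniq_get? rel PySem.Dict.empty x
  unfold buildUniq
  rw [PySem.Dict.getD_eq_get?_getD, h]
  cases hf : pvNextRels rel x with
  | nil => rfl
  | cons p tl =>
    cases tl with
    | nil => rfl
    | cons q tl' =>
      simp only [List.map_cons, List.foldl_cons, PySem.Dict.get?_empty, clsStep]
      rw [clsStep_foldl_some]
      cases tl' <;> simp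

-- the common value both chain walks compute: the maximal unique-successor extension of x
def extPure (uniq : PySem.Dict String (Option String)) : Nat → String → List String
  | 0, _ => []
  | n + 1, x =>
    match uniq.getD x none with
    | none => []
    | some y => y :: extPure uniq n y

-- A's chain walk is seq ++ extension (same fuel, step for step)
theorem chainA_eq (rel : List (String × String)) :
    ∀ (n : Nat) (x : String) (seq : List String),
      chainA rel n x seq = seq ++ extPure (buildUniq rel) n x := by
  intro n
  induction n with
  | zero => intro x seq; simp [chainA, extPure]
  | succ n ih =>
    intro x seq
    simp only [chainA, extPure, uniq_getD]
    cases hf : pvNextRels rel x with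
    | nil => simp
    | cons p tl =>
      cases tl with
      | nil => simp [ih p.2 (seq ++ [p.2])]
      | cons q tl' => simp

-- B's chase is tail ++ extension (same fuel, step for step)
theorem chase_eq (uniq : PySem.Dict String (Option String)) :
    ∀ (n : Nat) (x : String) (tail : List String),
      chase uniq n (uniq.getD x none) tail = tail ++ extPure uniq n x := by
  intro n
  induction n with
  | zero => intro x tail; simp [chase, extPure]
  | succ n ih =>
    intro x tail
    cases hg : uniq.getD x none with
    | none => simp [chase, extPure, hg]
    | some y => simp [chase, extPure, hg, ih y]

-- pass 2 invariant: every stored value is the extension of its key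
theorem buildExt_inv (uniq : PySem.Dict String (Option String)) (fuel : Nat) :
    ∀ (rel : List (String × String)) (d : PySem.Dict String (List String)),
      (∀ k v, d.get? k = some v → v = extPure uniq fuel k) →
      (∀ k v, (rel.foldl (fun d p => if p.1 != "start" && p.2 != "end" && !(d.contains p.2)
                then d.insert p.2 (chase uniq fuel (uniq.getD p.2 none) []) else d) d).get? k = some v
              → v = extPure uniq fuel k) := by
  intro rel
  induction rel with
  | nil => intro d hd; exact hd
  | cons p tl ih =>
    intro d hd
    simp only [List.foldl_cons]
    apply ih
    intro k v hk
    by_cases hg : (p.1 != "start" && p.2 != "end" && !(d.contains p.2)) = true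
    · rw [if_pos hg] at hk
      by_cases hkp : k = p.2
      · subst hkp
        rw [PySem.Dict.get?_insert_self] at hk
        injection hk with hv2
        rw [← hv2, chase_eq]
        simp
      · rw [PySem.Dict.get?_insert_of_ne d _ hkp] at hk
        exact hd k v hk
    · rw [if_neg hg] at hk
      exact hd k v hk

-- pass 2 keeps every key it has
theorem buildExt_mono (uniq : PySem.Dict String (Option String)) (fuel : Nat) :
    ∀ (rel : List (String × String)) (d : PySem.Dict String (List String)) (k : String),
      d.contains k = true →
      (rel.foldl (fun d p => if p.1 != "start" && p.2 != "end" && !(d.contains p.2)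
        then d.insert p.2 (chase uniq fuel (uniq.getD p.2 none) []) else d) d).contains k = true := by
  intro rel
  induction rel with
  | nil => intro d k hk; exact hk
  | cons p tl ih =>
    intro d k hk
    simp only [List.foldl_cons]
    apply ih
    by_cases hg : (p.1 != "start" && p.2 != "end" && !(d.contains p.2)) = true
    · rw [if_pos hg, PySem.Dict.contains_insert, hk, Bool.or_true]
    · rw [if_neg hg]; exact hk

-- pass 2 covers every eligible pair's head
theorem buildExt_covers (uniq : PySem.Dict String (Option String)) (fuel : Nat) :
    ∀ (rel : List (String × String)) (d : PySem.Dict String (List String)) (p : String × String),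
      p ∈ rel → (p.1 != "start" && p.2 != "end") = true →
      (rel.foldl (fun d p => if p.1 != "start" && p.2 != "end" && !(d.contains p.2)
        then d.insert p.2 (chase uniq fuel (uniq.getD p.2 none) []) else d) d).contains p.2 = true := by
  intro rel
  induction rel with
  | nil => intro d p hp; exact absurd hp (List.not_mem_nil)
  | cons q tl ih =>
    intro d p hp helig
    simp only [List.foldl_cons]
    rcases List.mem_cons.mp hp with hpq | hptl
    · subst hpq
      apply buildExt_mono
      by_cases hc : d.contains p.2 = true
      · by_cases hg : (p.1 != "start" && p.2 != "end" && !(d.contains p.2)) = true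
        · rw [if_pos hg, PySem.Dict.contains_insert, hc, Bool.or_true]
        · rw [if_neg hg]; exact hc
      · have hg : (p.1 != "start" && p.2 != "end" && !(d.contains p.2)) = true := by
          simp only [Bool.and_eq_true] at helig ⊢
          exact ⟨helig, by simp [hc]⟩
        rw [if_pos hg]
        exact PySem.Dict.contains_insert_self _ _ _
    · exact ih _ p hptl helig

-- hence: the table's lookup at an eligible head is the extension
theorem buildExt_getD (rel : List (String × String)) (fuel : Nat) (p : String × String)
    (hp : p ∈ rel) (helig : (p.1 != "start" && p.2 != "end") = true) :
    (buildExt (buildUniq rel) fuel rel).getD p.2 [] = extPure (buildUniq rel) fuel p.2 := by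
  have hc := buildExt_covers (buildUniq rel) fuel rel PySem.Dict.empty p hp helig
  unfold buildExt at *
  rw [PySem.Dict.contains_eq_isSome_get?] at hc
  cases hv : (rel.foldl (fun d p => if p.1 != "start" && p.2 != "end" && !(d.contains p.2)
        then d.insert p.2 (chase (buildUniq rel) fuel ((buildUniq rel).getD p.2 none) []) else d)
        PySem.Dict.empty).get? p.2 with
  | none => rw [hv] at hc; simp at hc
  | some v =>
    have hvv := buildExt_inv (buildUniq rel) fuel rel PySem.Dict.empty
      (by intro k v h; rw [PySem.Dict.get?_empty] at h; exact absurd h (by simp)) p.2 v hv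
    rw [PySem.Dict.getD_eq_get?_getD, hv, hvv]
    rfl

-- A's "create empty set if absent, then add" is exactly B's setdefault-then-add (= modify)
theorem entry_step_eq (d : PySem.Dict String (PySem.Set (List String))) (k : String) (t : List String) :
    (if d.contains k then d else d.insert k PySem.Set.empty).modify k PySem.Set.empty (fun s => PySem.Set.add s t)
      = d.modify k PySem.Set.empty (fun s => PySem.Set.add s t) := by
  by_cases h : d.contains k = true
  · simp [h]
  · have h' : d.contains k = false := by simpa using h
    simp [h, PySem.Dict.modify, PySem.Dict.getD_insert_self, PySem.Dict.insert_insert_self,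
      PySem.Dict.getD_of_not_contains d _ h']

-- the two per-pair steps agree on every pair of the relation
theorem step_eq (rel : List (String × String))
    (st : PySem.Set (List String) × PySem.Dict String (PySem.Set (List String)) × PySem.Dict String (PySem.Set (List String)))
    (ab : String × String) (hab : ab ∈ rel) :
    stepA rel st ab = stepB (buildExt (buildUniq rel) (rel.length + 1) rel) st ab := by
  unfold stepA stepB
  by_cases hg : (ab.1 != "start" && ab.2 != "end") = true
  · rw [if_pos hg, if_pos hg]
    have hseq : chainA rel (rel.length + 1) ab.2 [ab.1, ab.2]
        = ab.1 :: ab.2 :: (buildExt (buildUniq rel) (rel.length + 1) rel).getD ab.2 [] := by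
      rw [chainA_eq, buildExt_getD rel _ ab hab hg]; rfl
    simp only [hseq]
    rw [if_pos (by simp)]
    have hk0 : PySem.List.pyGetD (ab.1 :: ab.2 :: (buildExt (buildUniq rel) (rel.length + 1) rel).getD ab.2 []) 0 "" = ab.1 := by
      simp [PySem.List.pyGetD_zero]
    rw [hk0, entry_step_eq, entry_step_eq]
  · rw [if_neg hg, if_neg hg]

theorem ports_eq (rel : List (String × String)) :
    find_shared_sequences rel = find_shared_sequences_alt rel := by
  have h : rel.foldl (stepA rel)
      ((PySem.Set.empty : PySem.Set (List String)),
       (PySem.Dict.empty : PySem.Dict String (PySem.Set (List String))),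
       (PySem.Dict.empty : PySem.Dict String (PySem.Set (List String))))
    = rel.foldl (stepB (buildExt (buildUniq rel) (rel.length + 1) rel))
      ((PySem.Set.empty : PySem.Set (List String)),
       (PySem.Dict.empty : PySem.Dict String (PySem.Set (List String))),
       (PySem.Dict.empty : PySem.Dict String (PySem.Set (List String)))) :=
    PySem.List.foldl_congr_mem rel _ _ _ (fun st ab hab => step_eq rel st ab hab)
  simp only [find_shared_sequences, find_shared_sequences_alt, h]

-- ===== VERDICT (by name: the statement is the Claim_ definition above) =====
theorem find_shared_sequences_spec : Claim_equal_find_shared_sequences := by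
  intro rel _
  unfold Spec_find_shared_sequences
  exact ports_eq rel
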